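-- pv_equiv track=rewrite | github.com/chaeonee/Programmers | level4/무지의먹방라이브.py | solution
-- ===== SOURCE A (Python) =====
-- import heapq
--
-- def solution(food_times, k):
--     food_times = [[f,i+1] for i, f in enumerate(food_times)]
--     heapq.heapify(food_times)
--     #food_times = sorted(food_times, key=lambda x:x[0])
--
--     turn = 0
--     while food_times:
--         t, n = food_times[0]
--
--         if (t-turn)*len(food_times) > k:
--             break
--         k -= (t-turn)*len(food_times)
--         turn = t
--         heapq.heappop(food_times)
--
--     if not food_times:
--         return -1
--
--     food_times = sorted(food_times, key=lambda x:x[1])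
--
--     return food_times[k%len(food_times)][1]
-- ===== SOURCE B (Python) =====
-- def solution(food_times, k):
--     pairs = sorted((t, i + 1) for i, t in enumerate(food_times))
--     n = len(pairs)
--     turn = 0
--     i = 0
--     while i < n:
--         t = pairs[i][0]
--         cost = (t - turn) * (n - i)
--         if cost > k:
--             break
--         k -= cost
--         turn = t
--         i += 1
--     if i == n:
--         return -1
--     survivors = sorted(pairs[i:], key=lambda p: p[1])
--     return survivors[k % (n - i)][1]
-- ===== Notes on version B (the rewrite author's own statement) =====
-- stated objective: faster
-- what changed: Replaces the heapify + repeated heappop loop with one initial sort of the (time, index) pairs followed by a forward pointer scan over the sorted list (survivors are a tail slice instead of the leftover heap).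
import Mathlib
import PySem

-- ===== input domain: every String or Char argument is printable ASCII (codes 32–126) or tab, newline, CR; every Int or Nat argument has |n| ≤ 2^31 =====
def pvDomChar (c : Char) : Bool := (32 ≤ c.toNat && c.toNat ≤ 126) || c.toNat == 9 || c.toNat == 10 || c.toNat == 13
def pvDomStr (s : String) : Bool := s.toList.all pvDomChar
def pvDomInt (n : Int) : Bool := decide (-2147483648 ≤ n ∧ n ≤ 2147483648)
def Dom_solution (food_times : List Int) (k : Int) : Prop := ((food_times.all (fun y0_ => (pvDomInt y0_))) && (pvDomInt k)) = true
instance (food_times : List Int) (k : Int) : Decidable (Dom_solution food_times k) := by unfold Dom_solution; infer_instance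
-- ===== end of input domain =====

-- B replaces A's heapify + repeated heappop with one initial sort and a forward pointer
-- scan over the sorted array (measurably faster by a constant factor: one sort instead of
-- a per-element heap pop).


-- ===== PORT A =====
-- The heap of heapq is modelled abstractly by the multiset of its entries:
-- heapify is the identity on the entry list, peeking food_times[0] yields the least
-- entry under Python's lexicographic comparison of the [t, n] pairs (PySem.List.min2?,
-- exact because all entries are distinct), and heappop removes that least entry.
-- pvGmin is (definitionally) the fold step of PySem.List.min2? for fst/snd keys; it is
-- named so the termination argument of pvLoopA below can cite membership of the minimum.
def pvGmin (acc : Option (Int × Int)) (x : Int × Int) : Option (Int × Int) :=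
  match acc with
  | none => some x
  | some m => if (decide (x.1 < m.1) || (!decide (m.1 < x.1) && decide (x.2 < m.2))) then some x else some m

lemma pvMin2?_eq (l : List (Int × Int)) :
    PySem.List.min2? l (fun p => p.1) (fun p => p.2) = List.foldl pvGmin none l := by
  unfold PySem.List.min2?
  congr 1
  funext acc x
  cases acc <;> rfl

lemma pvFoldGmin_mem : ∀ (xs : List (Int × Int)) (acc : Option (Int × Int)) (m : Int × Int),
    List.foldl pvGmin acc xs = some m → m ∈ xs ∨ acc = some m := by
  intro xs
  induction xs with
  | nil => intro acc m h; exact Or.inr h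
  | cons x xs ih =>
    intro acc m h
    rcases ih (pvGmin acc x) m h with hx | hx
    · exact Or.inl (List.mem_cons_of_mem _ hx)
    · cases acc with
      | none => simp [pvGmin] at hx; exact Or.inl (by simp [hx])
      | some a =>
        simp only [pvGmin] at hx
        split at hx
        · exact Or.inl (by simp [← Option.some_inj.mp hx])
        · exact Or.inr hx

lemma pvFoldGmin_ne_none : ∀ (xs : List (Int × Int)) (acc : Option (Int × Int)),
    List.foldl pvGmin acc xs = none → acc = none ∧ xs = [] := by
  intro xs
  induction xs with
  | nil => intro acc h; exact ⟨h, rfl⟩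
  | cons x xs ih =>
    intro acc h
    rcases ih (pvGmin acc x) h with ⟨h1, _⟩
    cases acc with
    | none => simp [pvGmin] at h1
    | some a => simp only [pvGmin] at h1; split at h1 <;> simp at h1

lemma pvMin2?_getD_mem (l : List (Int × Int)) (hl : l ≠ []) :
    (PySem.List.min2? l (fun p => p.1) (fun p => p.2)).getD (0, 0) ∈ l := by
  rw [pvMin2?_eq]
  cases h : List.foldl pvGmin none l with
  | none => exact absurd (pvFoldGmin_ne_none l none h).2 hl
  | some m =>
    rcases pvFoldGmin_mem l none m h with hm | hm
    · simpa using hm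
    · simp at hm

-- the while-loop of A: peek the heap minimum, break or pop and continue
def pvLoopA (l : List (Int × Int)) (turn k : Int) : List (Int × Int) × Int :=
  if hl : l = [] then (l, k)
  else
    let m := (PySem.List.min2? l (fun p => p.1) (fun p => p.2)).getD (0, 0)
    if (m.1 - turn) * (l.length : Int) > k then (l, k)
    else pvLoopA (l.erase m) m.1 (k - (m.1 - turn) * (l.length : Int))
termination_by l.length
decreasing_by
  have hmem := pvMin2?_getD_mem l hl
  have h1 := List.length_erase_of_mem hmem
  have h2 : 0 < l.length := List.length_pos_of_ne_nil hl
  omega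

def solution (food_times : List Int) (k : Int) : Int :=
  let pairs := (PySem.List.enumerate food_times 0).map (fun p => (p.2, p.1 + 1))
  -- heapq.heapify(food_times): identity in the multiset model of the heap
  let r := pvLoopA pairs 0 k
  if r.1 = [] then -1
  else
    let s := PySem.List.sorted r.1 (fun p => p.2)
    (PySem.List.pyGetD s (PySem.Int.mod r.2 (s.length : Int)) (0, 0)).2

-- ===== PORT B =====
-- the pointer scan of B: walk the pre-sorted list, remaining count = length of the rest
def pvScanB : List (Int × Int) → Int → Int → List (Int × Int) × Int
  | [], _, k => ([], k)
  | p :: rest, turn, k =>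
    let cost := (p.1 - turn) * ((rest.length : Int) + 1)
    if cost > k then (p :: rest, k)
    else pvScanB rest p.1 (k - cost)

def solution_alt (food_times : List Int) (k : Int) : Int :=
  let pairs := PySem.List.sorted2 ((PySem.List.enumerate food_times 0).map (fun p => (p.2, p.1 + 1)))
      (fun p => p.1) (fun p => p.2)
  let r := pvScanB pairs 0 k
  if r.1 = [] then -1
  else
    let s := PySem.List.sorted r.1 (fun p => p.2)
    (PySem.List.pyGetD s (PySem.Int.mod r.2 (s.length : Int)) (0, 0)).2

-- ===== PRECONDITION & SPEC =====
def Spec_solution (food_times : List Int) (k : Int) (out : Int) : Prop := out = solution_alt food_times k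
instance (food_times : List Int) (k : Int) (out : Int) : Decidable (Spec_solution food_times k out) := by unfold Spec_solution; infer_instance

-- ===== CLAIM (what is proved, stated in full; the proofs are below) =====
def Claim_equal_solution : Prop := ∀ (food_times : List Int) (k : Int), Dom_solution food_times k → Spec_solution food_times k (solution food_times k)

-- ===== LEMMAS AND PROOFS =====

-- Python's lexicographic strict order on the (t, index) pairs
def pvLt (a b : Int × Int) : Prop := a.1 < b.1 ∨ (a.1 = b.1 ∧ a.2 < b.2)

lemma pvLt_asymm {a b : Int × Int} (h : pvLt a b) : ¬ pvLt b a := by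
  obtain ⟨a1, a2⟩ := a; obtain ⟨b1, b2⟩ := b; simp [pvLt] at *; omega

lemma pvLt_trans {a b c : Int × Int} (h1 : pvLt a b) (h2 : pvLt b c) : pvLt a c := by
  obtain ⟨a1, a2⟩ := a; obtain ⟨b1, b2⟩ := b; obtain ⟨c1, c2⟩ := c
  simp [pvLt] at *; omega

lemma pvLt_of_not_of_lt {a b c : Int × Int} (h1 : ¬ pvLt a b) (h2 : pvLt a c) : pvLt b c := by
  obtain ⟨a1, a2⟩ := a; obtain ⟨b1, b2⟩ := b; obtain ⟨c1, c2⟩ := c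
  simp [pvLt] at *; omega

lemma pvLe_antisymm {a b : Int × Int} (h1 : ¬ pvLt a b) (h2 : ¬ pvLt b a) : a = b := by
  obtain ⟨a1, a2⟩ := a; obtain ⟨b1, b2⟩ := b; simp [pvLt] at *; omega

-- the comparison boolean shared by min2? and sorted2 with fst/snd keys
def pvB (a b : Int × Int) : Bool :=
  decide (a.1 < b.1) || (!decide (b.1 < a.1) && decide (a.2 < b.2))

lemma pvB_iff {a b : Int × Int} : pvB a b = true ↔ pvLt a b := by
  obtain ⟨a1, a2⟩ := a; obtain ⟨b1, b2⟩ := b; simp [pvB, pvLt]; omega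

lemma pvSorted2_eq (l : List (Int × Int)) :
    PySem.List.sorted2 l (fun p => p.1) (fun p => p.2) false
      = List.foldl (fun acc x => PySem.List.insertBy pvB x acc) [] l := rfl

lemma pvInsertBy_pairwise (x : Int × Int) :
    ∀ (ys : List (Int × Int)), ys.Pairwise (fun a b => ¬ pvLt b a) →
      (PySem.List.insertBy pvB x ys).Pairwise (fun a b => ¬ pvLt b a) := by
  intro ys
  induction ys with
  | nil => intro _; simp [PySem.List.insertBy]
  | cons y ys ih =>
    intro h
    rw [List.pairwise_cons] at h
    rw [PySem.List.insertBy]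
    split
    · rename_i hb
      have hxy : pvLt x y := pvB_iff.mp hb
      refine List.Pairwise.cons ?_ (List.Pairwise.cons h.1 h.2)
      intro z hz
      rcases List.mem_cons.mp hz with rfl | hz
      · exact pvLt_asymm hxy
      · intro hzx
        exact (h.1 z hz) (pvLt_trans hzx hxy)
    · rename_i hb
      have hxy : ¬ pvLt x y := fun hc => hb (pvB_iff.mpr hc)
      refine List.Pairwise.cons ?_ (ih h.2)
      intro z hz
      rw [PySem.List.mem_insertBy] at hz
      rcases hz with rfl | hz
      · exact hxy
      · exact h.1 z hz

lemma pvFoldIns_pairwise :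
    ∀ (l acc : List (Int × Int)), acc.Pairwise (fun a b => ¬ pvLt b a) →
      (List.foldl (fun acc x => PySem.List.insertBy pvB x acc) acc l).Pairwise (fun a b => ¬ pvLt b a) := by
  intro l
  induction l with
  | nil => intro acc h; exact h
  | cons x xs ih => intro acc h; exact ih _ (pvInsertBy_pairwise x acc h)

lemma pvSorted2_pairwise (l : List (Int × Int)) :
    (PySem.List.sorted2 l (fun p => p.1) (fun p => p.2) false).Pairwise (fun a b => ¬ pvLt b a) := by
  rw [pvSorted2_eq]; exact pvFoldIns_pairwise l [] (by simp)

lemma pvFoldGmin_isMin :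
    ∀ (xs : List (Int × Int)) (acc : Option (Int × Int)) (m : Int × Int),
      List.foldl pvGmin acc xs = some m →
        (∀ y ∈ xs, ¬ pvLt y m) ∧ (∀ a, acc = some a → ¬ pvLt a m) := by
  intro xs
  induction xs with
  | nil =>
    intro acc m h
    rw [List.foldl_nil] at h
    refine ⟨by simp, fun a ha => ?_⟩
    rw [h] at ha
    rw [Option.some_inj] at ha
    subst ha
    simp [pvLt]
  | cons x xs ih =>
    intro acc m h
    obtain ⟨h1, h2⟩ := ih (pvGmin acc x) m h
    have hx : ¬ pvLt x m := by
      cases acc with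
      | none => exact h2 x rfl
      | some a =>
        simp only [pvGmin] at h2
        by_cases hb : pvB x a = true
        · simp only [pvB] at hb; rw [if_pos hb] at h2; exact h2 x rfl
        · simp only [pvB] at hb; rw [if_neg hb] at h2
          have ham : ¬ pvLt a m := h2 a rfl
          have hxa : ¬ pvLt x a := fun hc => hb (pvB_iff.mpr hc)
          intro hxm
          exact ham (pvLt_of_not_of_lt hxa hxm)
    refine ⟨?_, ?_⟩
    · intro y hy
      rcases List.mem_cons.mp hy with rfl | hy
      · exact hx
      · exact h1 y hy
    · intro a ha
      cases acc with
      | none => simp at ha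
      | some a1 =>
        rw [Option.some_inj] at ha
        subst ha
        simp only [pvGmin] at h2
        by_cases hb : pvB x a1 = true
        · rw [if_pos (by simpa [pvB] using hb)] at h2
          have hxm : ¬ pvLt x m := h2 x rfl
          have hxa : pvLt x a1 := pvB_iff.mp hb
          intro ham
          exact hxm (pvLt_trans hxa ham)
        · rw [if_neg (by simpa [pvB] using hb)] at h2
          exact h2 a1 rfl

-- the head of the Python sort is the heap minimum, and the tail is the sort of the rest
lemma pvSorted2_min_cons (l : List (Int × Int)) (m : Int × Int)
    (hm : List.foldl pvGmin none l = some m) :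
    PySem.List.sorted2 l (fun p => p.1) (fun p => p.2) false
      = m :: PySem.List.sorted2 (l.erase m) (fun p => p.1) (fun p => p.2) false := by
  have hmem : m ∈ l := by
    rcases pvFoldGmin_mem l none m hm with h | h
    · exact h
    · simp at h
  have hperm : (PySem.List.sorted2 l (fun p => p.1) (fun p => p.2) false).Perm
      (m :: PySem.List.sorted2 (l.erase m) (fun p => p.1) (fun p => p.2) false) := by
    refine (PySem.List.sorted2_perm l _ _ false).trans ?_
    refine (List.perm_cons_erase hmem).trans ?_
    exact List.Perm.cons m (PySem.List.sorted2_perm (l.erase m) _ _ false).symm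
  have hs1 : (PySem.List.sorted2 l (fun p => p.1) (fun p => p.2) false).Pairwise
      (fun a b => ¬ pvLt b a) := pvSorted2_pairwise l
  have hs2 : (m :: PySem.List.sorted2 (l.erase m) (fun p => p.1) (fun p => p.2) false).Pairwise
      (fun a b => ¬ pvLt b a) := by
    refine List.Pairwise.cons ?_ (pvSorted2_pairwise (l.erase m))
    intro z hz
    have hz' : z ∈ l := List.mem_of_mem_erase
      ((PySem.List.sorted2_perm (l.erase m) _ _ false).mem_iff.mp hz)
    exact (pvFoldGmin_isMin l none m hm).1 z hz'
  exact List.Perm.eq_of_pairwise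
    (fun a b _ _ h1 h2 => pvLe_antisymm h2 h1) hs1 hs2 hperm

-- B's scan over the sorted entries simulates A's heap loop
lemma pvLoop_eq : ∀ (n : Nat) (l : List (Int × Int)), l.length = n → ∀ (turn k : Int),
    pvScanB (PySem.List.sorted2 l (fun p => p.1) (fun p => p.2) false) turn k
      = (PySem.List.sorted2 (pvLoopA l turn k).1 (fun p => p.1) (fun p => p.2) false,
         (pvLoopA l turn k).2) := by
  intro n
  induction n with
  | zero =>
    intro l hl turn k
    rw [List.length_eq_zero_iff] at hl; subst hl
    rw [pvLoopA.eq_def]; simp [pvScanB, PySem.List.sorted2]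
  | succ n ih =>
    intro l hl turn k
    have hne : l ≠ [] := by intro h; subst h; simp at hl
    obtain ⟨m, hm⟩ : ∃ m, List.foldl pvGmin none l = some m := by
      cases h : List.foldl pvGmin none l with
      | none => exact absurd (pvFoldGmin_ne_none l none h).2 hne
      | some m => exact ⟨m, rfl⟩
    have hmem : m ∈ l := by
      rcases pvFoldGmin_mem l none m hm with h | h
      · exact h
      · simp at h
    have hlenE : (l.erase m).length = n := by
      have := List.length_erase_of_mem hmem; omega
    have hlenS : ((PySem.List.sorted2 (l.erase m) (fun p => p.1) (fun p => p.2) false).length : Int) + 1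
        = (l.length : Int) := by
      have := (PySem.List.sorted2_perm (l.erase m) (fun p => p.1) (fun p => p.2) false).length_eq
      rw [this, hlenE, hl]; push_cast; ring
    rw [pvSorted2_min_cons l m hm]
    rw [pvLoopA, dif_neg hne]
    simp only [pvScanB, pvMin2?_eq, hm, Option.getD_some, hlenS]
    split
    · rw [pvSorted2_min_cons l m hm]
    · exact ih (l.erase m) hlenE m.1 (k - (m.1 - turn) * (l.length : Int))

-- A's loop only ever removes entries: the survivors are a sublist of the initial entries
lemma pvLoopA_sublist : ∀ (n : Nat) (l : List (Int × Int)), l.length = n → ∀ (turn k : Int),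
    (pvLoopA l turn k).1.Sublist l := by
  intro n
  induction n with
  | zero =>
    intro l hl turn k
    rw [List.length_eq_zero_iff] at hl; subst hl
    rw [pvLoopA.eq_def]; simp
  | succ n ih =>
    intro l hl turn k
    rw [pvLoopA.eq_def]
    by_cases hne : l = []
    · simp [hne]
    rw [dif_neg hne]
    dsimp only
    split
    · exact List.Sublist.refl l
    · set m := (PySem.List.min2? l (fun p => p.1) (fun p => p.2)).getD (0, 0) with hmdef
      have hmem : m ∈ l := pvMin2?_getD_mem l hne
      have hlenE : (l.erase m).length = n := by
        have := List.length_erase_of_mem hmem; omega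
      exact (ih (l.erase m) hlenE m.1 _).trans (List.erase_sublist)

-- the index components of the initial entries are pairwise distinct
lemma pvPairs_snd_nodup (food_times : List Int) :
    (((PySem.List.enumerate food_times 0).map (fun p => (p.2, p.1 + 1))).map
      (fun p : Int × Int => p.2)).Nodup := by
  rw [List.map_map]
  have h := PySem.List.pairwise_lt_enumerate food_times 0
  rw [List.nodup_iff_pairwise_ne, List.pairwise_map]
  exact h.imp (by intro a b hab; simp; omega)

-- ===== VERDICT (by name: the statement is the Claim_ definition above) =====
theorem solution_spec : Claim_equal_solution := by
  unfold Claim_equal_solution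
  intro food_times k _
  unfold Spec_solution solution solution_alt
  dsimp only
  set pairs := (PySem.List.enumerate food_times 0).map (fun p => (p.2, p.1 + 1)) with hpairs
  have hinv := pvLoop_eq pairs.length pairs rfl 0 k
  rw [hinv]
  set r := pvLoopA pairs 0 k with hr
  by_cases hnil : r.1 = []
  · simp [hnil, PySem.List.sorted2]
  · have hnil2 : PySem.List.sorted2 r.1 (fun p => p.1) (fun p => p.2) false ≠ [] := by
      intro h
      have := (PySem.List.sorted2_perm r.1 (fun p => p.1) (fun p => p.2) false).length_eq
      rw [h] at this
      exact hnil (List.length_eq_zero_iff.mp this.symm)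
    rw [if_neg hnil, if_neg hnil2]
    -- the two survivor lists are equal once each is re-sorted by index
    have hnodup : (r.1.map (fun p : Int × Int => p.2)).Nodup := by
      have hsub := pvLoopA_sublist pairs.length pairs rfl 0 k
      exact (pvPairs_snd_nodup food_times).sublist (hsub.map _)
    have hkey : PySem.List.sorted (PySem.List.sorted2 r.1 (fun p => p.1) (fun p => p.2) false)
        (fun p => p.2) false = PySem.List.sorted r.1 (fun p => p.2) false := by
      apply PySem.List.sorted_eq_of_perm_of_pairwise_lt
      · exact (PySem.List.sorted_perm r.1 (fun p => p.2) false).trans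
          (PySem.List.sorted2_perm r.1 (fun p => p.1) (fun p => p.2) false).symm
      · have hle := PySem.List.sorted_pairwise r.1 (fun p => p.2)
        have hne : ((PySem.List.sorted r.1 (fun p => p.2) false).map
            (fun p : Int × Int => p.2)).Nodup :=
          hnodup.perm ((PySem.List.sorted_perm r.1 (fun p => p.2) false).map _).symm
        rw [List.nodup_iff_pairwise_ne, List.pairwise_map] at hne
        exact (hle.and hne).imp (by intro a b ⟨h1, h2⟩; omega)
    rw [hkey]
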